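-- pv_equiv track=rewrite | github.com/leeve1247/TIL | CodingTest/programmers/21.05.May/210512/test01.py | solution
-- ===== SOURCE A (Python) =====
-- def makearr(n,arr):
--     answer = []
--     for i in range(len(arr)):
--         answer.append([])
--         temp = arr[i]
--         while True:
--             if temp <= 0:
--                 break
--             answer[i].insert(0,temp%2)
--             temp = temp//2
--         if len(answer[i]) < n:
--             while True:
--                 if len(answer[i]) == n:
--                     break
--                 answer[i].insert(0,0)
--     return answer
--
-- def solution(n, arr1, arr2):
--     answer= []
--     arr1 = makearr(n,arr1)
--     arr2 = makearr(n,arr2)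
--     for i in range(n):
--         answer.append("")
--         for j in range(len(arr1[0])):
--             if arr1[i][j] == 1 or arr2[i][j] == 1:
--                    answer[i] +="#"
--             else:
--                    answer[i] += " "
--     return answer
-- ===== SOURCE B (Python) =====
-- def solution(n, arr1, arr2):
--     # OR the two numbers of each row (entries <= 0 carry no bits, as in the bit loop of A),
--     # format as an n-wide zero-padded binary string, translate digits to '#'/' '.
--     out = []
--     for i in range(n):
--         bits = (arr1[i] if arr1[i] > 0 else 0) | (arr2[i] if arr2[i] > 0 else 0)
--         out.append(format(bits, '0%db' % n).replace('1', '#').replace('0', ' '))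
--     return out
-- ===== Notes on version B (the rewrite author's own statement) =====
-- stated objective: faster
-- what changed: Replaces A's per-number bit-list construction (repeated %2,//2 with insert(0,..) padding) and the doubly nested index loops building each row character by character with one bitwise OR per row formatted via format(v, '0{n}b') and two str.replace calls.
-- outside the precondition, e.g. on solution(1, [0, -1, 1, 4], [8, 0, 8, -1]): A returns ['#'], B returns ['#   ']; on solution(1, [2], [2]): A returns ['# '], B returns ['# ']; on solution(2, [4, 1], [0, 0]): A raises IndexError, B returns ['#  ', ' #']
import Mathlib
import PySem

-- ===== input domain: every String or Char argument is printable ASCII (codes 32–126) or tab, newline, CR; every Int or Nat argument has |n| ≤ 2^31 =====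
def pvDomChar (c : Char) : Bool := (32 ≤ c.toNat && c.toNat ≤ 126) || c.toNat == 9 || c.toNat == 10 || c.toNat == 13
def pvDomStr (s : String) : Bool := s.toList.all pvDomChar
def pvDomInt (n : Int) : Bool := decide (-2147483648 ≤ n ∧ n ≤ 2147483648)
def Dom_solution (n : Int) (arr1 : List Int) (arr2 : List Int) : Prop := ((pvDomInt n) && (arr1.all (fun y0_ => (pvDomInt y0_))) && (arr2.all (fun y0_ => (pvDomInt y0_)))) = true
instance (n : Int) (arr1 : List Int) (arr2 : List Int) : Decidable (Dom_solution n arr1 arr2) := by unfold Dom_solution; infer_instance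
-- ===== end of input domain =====

-- B replaces A's per-bit list building plus doubly nested indexing loops by one bitwise OR
-- per row formatted as an n-wide binary string; equivalence is proved on Pre_solution.

-- ===== PORT A =====
-- the inner `while True: … temp%2 … temp//2` loop of makearr (prepends bits, low bit first)
def rawBits (t : Int) (acc : List Int) : List Int :=
  if t ≤ 0 then acc
  else rawBits (PySem.Int.floordiv t 2) (PySem.Int.mod t 2 :: acc)
termination_by t.toNat
decreasing_by simp [PySem.Int.floordiv, Int.fdiv_eq_ediv_of_nonneg _ (by omega : (0:Int) ≤ 2)]; omega

-- the padding `while True: … insert(0,0)` loop, entered only when len < n (guard keeps it total)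
def padTo (n : Int) (l : List Int) : List Int :=
  if (l.length : Int) < n then padTo n (0 :: l) else l
termination_by (n - l.length).toNat
decreasing_by simp; omega

-- the body of makearr's outer loop: one row of the bit matrix
def rowA (n : Int) (v : Int) : List Int :=
  let row := rawBits v []
  if (row.length : Int) < n then padTo n row else row

def makearr (n : Int) (arr : List Int) : List (List Int) :=
  arr.foldl (fun answer v => answer ++ [rowA n v]) []

def solution (n : Int) (arr1 : List Int) (arr2 : List Int) : List String :=
  let a1 := makearr n arr1
  let a2 := makearr n arr2
  (PySem.List.pyRange 0 n 1).foldl (fun answer i =>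
    answer ++ [String.ofList ((PySem.List.pyRange 0 ((PySem.List.pyGetD a1 0 []).length : Int) 1).foldl
      (fun s j =>
        if PySem.List.pyGetD (PySem.List.pyGetD a1 i []) j 0 == 1
            || PySem.List.pyGetD (PySem.List.pyGetD a2 i []) j 0 == 1
        then s ++ ['#'] else s ++ [' ']) [])]) []

-- ===== PORT B =====
-- hand port of format(v, 'b') for v > 0 (big-endian binary digits); exact on naturals
def binNat (v : Nat) : List Char :=
  if v = 0 then []
  else binNat (v / 2) ++ [if v % 2 = 1 then '1' else '0']

-- format(v, '0{w}b') for v ≥ 0: zero-pad on the left to width w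
def fmtBin (w : Nat) (v : Nat) : List Char :=
  let s := if v = 0 then ['0'] else binNat v
  List.replicate (w - s.length) '0' ++ s

-- .replace('1','#').replace('0',' '): patterns are single chars and '#' ∉ {'0','1'},
-- so the two replaces are exactly this character map
def rep (c : Char) : Char := if c = '1' then '#' else if c = '0' then ' ' else c

def solution_alt (n : Int) (arr1 : List Int) (arr2 : List Int) : List String :=
  (PySem.List.pyRange 0 n 1).map (fun i =>
    String.ofList ((fmtBin n.toNat
      (PySem.Int.bor (if 0 < PySem.List.pyGetD arr1 i 0 then PySem.List.pyGetD arr1 i 0 else 0)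
                     (if 0 < PySem.List.pyGetD arr2 i 0 then PySem.List.pyGetD arr2 i 0 else 0)).toNat).map rep))

-- ===== PRECONDITION & SPEC =====
-- Pre_ restricts to the puzzle's natural domain: both arrays hold at least n rows and every
-- used positive value fits in n bits (stated via bit_length, which is cheap to check).  On
-- positive values wider than n bits A's unpadded rows overflow the n-column grid: A raises
-- IndexError in general, and returns an over-wide grid only when the row lengths coincide.
def Pre_solution (n : Int) (arr1 : List Int) (arr2 : List Int) : Prop :=
  n ≤ (arr1.length : Int) ∧ n ≤ (arr2.length : Int) ∧
  (∀ v ∈ arr1.take n.toNat, 0 < v → PySem.Int.bitLength v ≤ n.toNat) ∧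
  (∀ v ∈ arr2.take n.toNat, 0 < v → PySem.Int.bitLength v ≤ n.toNat)
instance (n : Int) (arr1 : List Int) (arr2 : List Int) : Decidable (Pre_solution n arr1 arr2) := by
  unfold Pre_solution; infer_instance

def pvWitness_solution : Int × List Int × List Int := (2, [1, 2], [3, 0])

def Spec_solution (n : Int) (arr1 : List Int) (arr2 : List Int) (out : List String) : Prop := out = solution_alt n arr1 arr2
instance (n : Int) (arr1 : List Int) (arr2 : List Int) (out : List String) : Decidable (Spec_solution n arr1 arr2 out) := by unfold Spec_solution; infer_instance

-- ===== CLAIM (what is proved, stated in full; the proofs are below) =====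
def Claim_equal_solution : Prop := ∀ (n : Int) (arr1 : List Int) (arr2 : List Int), Dom_solution n arr1 arr2 → Pre_solution n arr1 arr2 → Spec_solution n arr1 arr2 (solution n arr1 arr2)

-- ===== LEMMAS AND PROOFS =====

-- proof-side reference: big-endian bit lists
def natBits (v : Nat) : List Int :=
  if v = 0 then [] else natBits (v / 2) ++ [((v % 2 : Nat) : Int)]

def bitsBE : Nat → Nat → List Int
  | 0, _ => []
  | N + 1, v => bitsBE N (v / 2) ++ [((v % 2 : Nat) : Int)]

theorem rawBits_eq (v : Int) (acc : List Int) :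
    rawBits v acc = natBits v.toNat ++ acc := by
  rw [rawBits]
  by_cases h : v ≤ 0
  · rw [if_pos h, show v.toNat = 0 by omega, natBits]; simp
  · simp only [if_neg h]
    have hd : PySem.Int.floordiv v 2 = v / 2 := PySem.Int.floordiv_eq_ediv_of_pos (by omega)
    have hm : PySem.Int.mod v 2 = v % 2 := PySem.Int.mod_eq_emod_of_pos (by omega)
    rw [hd, hm, rawBits_eq (v / 2)]
    conv_rhs => rw [natBits]
    have hvz : ¬ v.toNat = 0 := by omega
    simp only [if_neg hvz]
    have h1 : (v / 2).toNat = v.toNat / 2 := by omega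
    have h2 : ((v.toNat % 2 : Nat) : Int) = v % 2 := by omega
    rw [h1, h2]; simp
termination_by v.toNat
decreasing_by omega

theorem natBits_len_le (N v : Nat) (h : v < 2 ^ N) : (natBits v).length ≤ N := by
  rw [natBits]
  by_cases hz : v = 0
  · simp [hz]
  · simp only [if_neg hz]
    cases N with
    | zero => simp at h; omega
    | succ N =>
      have h2 : v / 2 < 2 ^ N := by
        have : (2:Nat) ^ (N+1) = 2 * 2 ^ N := by rw [pow_succ']
        omega
      have := natBits_len_le N (v / 2) h2
      simp [List.length_append]; omega
termination_by v
decreasing_by omega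

theorem replicate_natBits (N v : Nat) (h : v < 2 ^ N) :
    List.replicate (N - (natBits v).length) 0 ++ natBits v = bitsBE N v := by
  induction N generalizing v with
  | zero =>
    have : v = 0 := by simpa using h
    subst this; rw [natBits]; simp [bitsBE]
  | succ N ih =>
    by_cases hz : v = 0
    · subst hz
      rw [natBits]; simp only [reduceIte]
      have h0 : bitsBE N 0 = List.replicate N 0 := by
        have := ih 0 (Nat.pow_pos (by omega))
        rw [natBits] at this; simpa using this.symm
      show List.replicate (N + 1 - 0) 0 ++ [] = bitsBE (N+1) 0
      rw [bitsBE, h0]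
      simp [List.replicate_succ']
    · have h2 : v / 2 < 2 ^ N := by
        have : (2:Nat) ^ (N+1) = 2 * 2 ^ N := by rw [pow_succ']
        omega
      have hl : natBits v = natBits (v / 2) ++ [((v % 2 : Nat) : Int)] := by
        rw [natBits]; simp [hz]
      rw [bitsBE, ← ih (v / 2) h2, hl]
      have he : N + 1 - (natBits (v / 2) ++ [((v % 2 : Nat) : Int)]).length
          = N - (natBits (v / 2)).length := by simp
      rw [he, ← List.append_assoc]

theorem padTo_eq (n : Int) (l : List Int) (h : (l.length : Int) ≤ n) :
    padTo n l = List.replicate (n.toNat - l.length) 0 ++ l := by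
  rw [padTo]
  by_cases hc : (l.length : Int) < n
  · simp only [if_pos hc]
    rw [padTo_eq n (0 :: l) (by simp; omega)]
    have he : n.toNat - l.length = (n.toNat - (0 :: l).length) + 1 := by
      simp; omega
    rw [he, List.replicate_succ']
    simp
  · simp only [if_neg hc]
    have : n.toNat - l.length = 0 := by omega
    simp [this]
termination_by (n - l.length).toNat
decreasing_by simp; omega

theorem length_bitsBE (N v : Nat) : (bitsBE N v).length = N := by
  induction N generalizing v with
  | zero => simp [bitsBE]
  | succ N ih => simp [bitsBE, ih]

theorem bitsBE_eq_map (N v : Nat) :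
    bitsBE N v = (List.range N).map (fun j => ((v / 2 ^ (N - 1 - j) % 2 : Nat) : Int)) := by
  induction N generalizing v with
  | zero => simp [bitsBE]
  | succ N ih =>
    rw [bitsBE, ih, List.range_succ, List.map_append]
    congr 1
    · apply List.map_congr_left
      intro j hj
      rw [List.mem_range] at hj
      have hpow : (2:Nat) * 2 ^ (N - 1 - j) = 2 ^ (N + 1 - 1 - j) := by
        rw [← pow_succ']; congr 1; omega
      rw [Nat.div_div_eq_div_mul, hpow]
    · simp

theorem toNat_lt_two_pow (N : Nat) (v : Int) (hb : 0 < v → PySem.Int.bitLength v ≤ N) :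
    v.toNat < 2 ^ N := by
  by_cases h : 0 < v
  · have h1 := PySem.Int.lt_two_pow_bitLength v
    have h2 : (2:Nat) ^ (PySem.Int.bitLength v) ≤ 2 ^ N := Nat.pow_le_pow_right (by omega) (hb h)
    omega
  · have h3 : (0:Nat) < 2 ^ N := Nat.pow_pos (by omega)
    omega

theorem makearr_row (n : Int) (v : Int) (hvN : v.toNat < 2 ^ n.toNat) :
    rowA n v = bitsBE n.toNat v.toNat := by
  unfold rowA
  rw [rawBits_eq v []]
  simp only [List.append_nil]
  have hlen := natBits_len_le n.toNat v.toNat hvN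
  by_cases hc : ((natBits v.toNat).length : Int) < n
  · simp only [if_pos hc]
    rw [padTo_eq n _ (le_of_lt hc)]
    exact replicate_natBits n.toNat v.toNat hvN
  · simp only [if_neg hc]
    have : n.toNat - (natBits v.toNat).length = 0 := by omega
    have h2 := replicate_natBits n.toNat v.toNat hvN
    rw [this] at h2; simpa using h2

theorem binNat_eq (v : Nat) :
    binNat v = (natBits v).map (fun b => if b == 1 then '1' else '0') := by
  rw [binNat, natBits]
  by_cases hz : v = 0
  · simp [hz]
  · simp only [if_neg hz, List.map_append]
    rw [binNat_eq (v / 2)]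
    congr 1
    by_cases h2 : v % 2 = 1 <;> (simp [h2]; try omega)
termination_by v
decreasing_by omega

theorem bitsBE_zero (N : Nat) : bitsBE N 0 = List.replicate N 0 := by
  induction N with
  | zero => simp [bitsBE]
  | succ N ih => rw [bitsBE, ih]; simp [List.replicate_succ']

theorem fmtBin_eq (N v : Nat) (hN : 0 < N) (h : v < 2 ^ N) :
    fmtBin N v = (bitsBE N v).map (fun b => if b == 1 then '1' else '0') := by
  unfold fmtBin
  by_cases hz : v = 0
  · subst hz
    simp only [reduceIte]
    rw [bitsBE_zero]
    simp [List.map_replicate]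
    rw [show N = (N - 1) + 1 by omega, List.replicate_succ']
    simp
  · simp only [if_neg hz]
    rw [binNat_eq, ← replicate_natBits N v h, List.map_append, List.map_replicate]
    congr 2
    simp [List.length_map]
theorem lor_bit (a b k : Nat) :
    (a ||| b) / 2 ^ k % 2 = 1 ↔ (a / 2 ^ k % 2 = 1 ∨ b / 2 ^ k % 2 = 1) := by
  have h := congrArg (fun x => x = true) (Nat.testBit_lor a b k)
  simp only [Nat.testBit_eq_decide_div_mod_eq, decide_eq_true_eq, Bool.or_eq_true] at h
  exact of_eq h

theorem clamp_toNat (a : Int) : (if 0 < a then a else 0) = ((a.toNat : Nat) : Int) := by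
  split_ifs <;> omega

theorem foldl_if_append {α : Type} (p : α → Bool) (c1 c2 : Char) (l : List α) (acc : List Char) :
    l.foldl (fun s x => if p x then s ++ [c1] else s ++ [c2]) acc
      = acc ++ l.map (fun x => if p x then c1 else c2) := by
  induction l generalizing acc with
  | nil => simp
  | cons x xs ih =>
    simp only [List.foldl_cons, List.map_cons]
    by_cases hp : p x = true
    · simp [hp, ih]
    · simp [hp, ih]

-- ===== VERDICT (by name: the statement is the Claim_ definition above) =====
theorem solution_spec : Claim_equal_solution := by
  intro n arr1 arr2 _dom pre
  obtain ⟨h1, h2, hb1, hb2⟩ := pre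
  show solution n arr1 arr2 = solution_alt n arr1 arr2
  unfold solution solution_alt makearr
  simp only [PySem.List.foldl_append_singleton_eq_map, List.nil_append]
  apply List.map_congr_left
  intro i hi
  rw [PySem.List.mem_pyRange_one] at hi
  obtain ⟨hi0, hin⟩ := hi
  have hN : 0 < n := lt_of_le_of_lt hi0 hin
  have hiN : i.toNat < n.toNat := by omega
  -- the two bit rows used at index i
  have hlen1 : i.toNat < arr1.length := by omega
  have hlen2 : i.toNat < arr2.length := by omega
  have hv1 : 0 < arr1[i.toNat] → PySem.Int.bitLength arr1[i.toNat] ≤ n.toNat := by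
    apply hb1; rw [← List.getElem_take (i := i.toNat) (xs := arr1)]
    exact List.getElem_mem _
    · simpa [List.length_take] using (by omega : i.toNat < min n.toNat arr1.length)
  have hv2 : 0 < arr2[i.toNat] → PySem.Int.bitLength arr2[i.toNat] ≤ n.toNat := by
    apply hb2; rw [← List.getElem_take (i := i.toNat) (xs := arr2)]
    exact List.getElem_mem _
    · simpa [List.length_take] using (by omega : i.toNat < min n.toNat arr2.length)
  have hrow1 : PySem.List.pyGetD (arr1.map (fun v => rowA n v)) i [] = bitsBE n.toNat (arr1[i.toNat]).toNat := by
    rw [PySem.List.pyGetD_eq_getElem _ _ hi0 (by simpa using (by omega : i < (arr1.length : Int)))]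
    simp only [List.getElem_map]
    exact makearr_row n _ (toNat_lt_two_pow _ _ hv1)
  have hrow2 : PySem.List.pyGetD (arr2.map (fun v => rowA n v)) i [] = bitsBE n.toNat (arr2[i.toNat]).toNat := by
    rw [PySem.List.pyGetD_eq_getElem _ _ hi0 (by simpa using (by omega : i < (arr2.length : Int)))]
    simp only [List.getElem_map]
    exact makearr_row n _ (toNat_lt_two_pow _ _ hv2)
  -- the first row, giving the inner loop bound n
  have h0len : arr1.length ≠ 0 := by omega
  have hv0 : 0 < arr1[0] → PySem.Int.bitLength arr1[0] ≤ n.toNat := by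
    apply hb1; rw [← List.getElem_take (i := 0) (xs := arr1)]
    exact List.getElem_mem _
    · simpa [List.length_take] using (by omega : 0 < min n.toNat arr1.length)
  have hrow0 : PySem.List.pyGetD (arr1.map (fun v => rowA n v)) 0 [] = bitsBE n.toNat (arr1[0]).toNat := by
    rw [PySem.List.pyGetD_eq_getElem _ _ (by omega) (by simpa using (by omega : (0:Int) < (arr1.length : Int)))]
    simp only [List.getElem_map]
    exact makearr_row n _ (toNat_lt_two_pow _ _ hv0)
  rw [hrow0, hrow1, hrow2, length_bitsBE]
  rw [PySem.List.pyGetD_eq_getElem arr1 0 hi0 (by exact_mod_cast (by omega : i < (arr1.length : Int))),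
      PySem.List.pyGetD_eq_getElem arr2 0 hi0 (by exact_mod_cast (by omega : i < (arr2.length : Int))),
      clamp_toNat arr1[i.toNat], clamp_toNat arr2[i.toNat],
      PySem.Int.bor_natCast, Int.toNat_natCast]
  have ha : (arr1[i.toNat]).toNat < 2 ^ n.toNat := toNat_lt_two_pow _ _ hv1
  have hbn : (arr2[i.toNat]).toNat < 2 ^ n.toNat := toNat_lt_two_pow _ _ hv2
  have hc : (arr1[i.toNat]).toNat ||| (arr2[i.toNat]).toNat < 2 ^ n.toNat :=
    Nat.bitwise_lt_two_pow ha hbn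
  rw [fmtBin_eq _ _ (by omega) hc, foldl_if_append, PySem.List.pyRange_zero_natCast,
      List.map_map, List.map_map, List.nil_append]
  congr 1
  conv_rhs => rw [bitsBE_eq_map]
  rw [List.map_map]
  apply List.map_congr_left
  intro j hj
  rw [List.mem_range] at hj
  simp only [Function.comp_apply, PySem.List.pyGetD_natCast]
  rw [bitsBE_eq_map n.toNat (arr1[i.toNat]).toNat, bitsBE_eq_map n.toNat (arr2[i.toNat]).toNat,
      PySem.List.getD_map_range _ _ _ _ hj, PySem.List.getD_map_range _ _ _ _ hj]
  -- pointwise: the OR of the two bits is the bit of the OR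
  have hOr := lor_bit (arr1[i.toNat]).toNat (arr2[i.toNat]).toNat (n.toNat - 1 - j)
  by_cases hA : (arr1[i.toNat]).toNat / 2 ^ (n.toNat - 1 - j) % 2 = 1 <;>
    by_cases hB : (arr2[i.toNat]).toNat / 2 ^ (n.toNat - 1 - j) % 2 = 1
  · have hC : ((arr1[i.toNat]).toNat ||| (arr2[i.toNat]).toNat) / 2 ^ (n.toNat - 1 - j) % 2 = 1 :=
      hOr.mpr (Or.inl hA)
    simp [hA, hB, hC, rep]
  · have hC : ((arr1[i.toNat]).toNat ||| (arr2[i.toNat]).toNat) / 2 ^ (n.toNat - 1 - j) % 2 = 1 :=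
      hOr.mpr (Or.inl hA)
    have hB0 : (arr2[i.toNat]).toNat / 2 ^ (n.toNat - 1 - j) % 2 = 0 := by omega
    simp [hA, hB0, hC, rep]
  · have hC : ((arr1[i.toNat]).toNat ||| (arr2[i.toNat]).toNat) / 2 ^ (n.toNat - 1 - j) % 2 = 1 :=
      hOr.mpr (Or.inr hB)
    have hA0 : (arr1[i.toNat]).toNat / 2 ^ (n.toNat - 1 - j) % 2 = 0 := by omega
    simp [hA0, hB, hC, rep]
  · have hC : ((arr1[i.toNat]).toNat ||| (arr2[i.toNat]).toNat) / 2 ^ (n.toNat - 1 - j) % 2 = 0 := by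
      rcases Nat.mod_two_eq_zero_or_one (((arr1[i.toNat]).toNat ||| (arr2[i.toNat]).toNat) / 2 ^ (n.toNat - 1 - j)) with h | h
      · exact h
      · rcases hOr.mp h with h' | h' <;> omega
    have hA0 : (arr1[i.toNat]).toNat / 2 ^ (n.toNat - 1 - j) % 2 = 0 := by omega
    have hB0 : (arr2[i.toNat]).toNat / 2 ^ (n.toNat - 1 - j) % 2 = 0 := by omega
    simp [hA0, hB0, hC, rep]
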